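-- pv_equiv track=rewrite | github.com/alexandertiopan1212/capitalized | project_financing_function.py | aggregate_cash_flows_to_annual
-- ===== SOURCE A (Python) =====
-- def aggregate_cash_flows_to_annual(cash_flows, frequency):
--     """
--     Aggregate cash flows to annual cash flows based on the frequency.
--
--     Args:
--         cash_flows (list): List of cash flows (input frequency).
--         frequency (str): Frequency of the cash flows ("Monthly", "Quarterly", "Semi-Annually", "Annually").
--
--     Returns:
--         list: Aggregated cash flows to annual periods.
--     """
--     # Add support for semi-annual frequency
--     freq_map = {"Monthly": 12, "Quarterly": 4, "Semi-Annually": 2, "Annually": 1}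
--     periods_per_year = freq_map.get(frequency, 1)
--
--     if periods_per_year == 1:
--         # If the cash flows are already annual, no need to aggregate
--         return cash_flows
--
--     # Aggregate the cash flows by summing over the periods_per_year
--     aggregated_cash_flows = []
--     for i in range(0, len(cash_flows), periods_per_year):
--         annual_cash_flow = sum(cash_flows[i : i + periods_per_year])
--         aggregated_cash_flows.append(annual_cash_flow)
--
--     return aggregated_cash_flows
-- ===== SOURCE B (Python) =====
-- def aggregate_cash_flows_to_annual(cash_flows, frequency):
--     """Single pass with a running accumulator flushed every periods_per_year values."""
--     freq_map = {"Monthly": 12, "Quarterly": 4, "Semi-Annually": 2, "Annually": 1}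
--     periods_per_year = freq_map.get(frequency, 1)
--
--     if periods_per_year == 1:
--         return cash_flows
--
--     result = []
--     acc = 0
--     cnt = 0
--     for v in cash_flows:
--         acc += v
--         cnt += 1
--         if cnt == periods_per_year:
--             result.append(acc)
--             acc = 0
--             cnt = 0
--     if cnt:
--         result.append(acc)
--     return result
-- ===== Notes on version B (the rewrite author's own statement) =====
-- stated objective: alternative
-- what changed: Replaces A's chunked slice-and-sum over range(0, n, k) with a single pass that keeps a running sum and counter, flushing the accumulator into the result every k values (and once more for a trailing partial chunk); no slicing or index arithmetic.
import Mathlib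
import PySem

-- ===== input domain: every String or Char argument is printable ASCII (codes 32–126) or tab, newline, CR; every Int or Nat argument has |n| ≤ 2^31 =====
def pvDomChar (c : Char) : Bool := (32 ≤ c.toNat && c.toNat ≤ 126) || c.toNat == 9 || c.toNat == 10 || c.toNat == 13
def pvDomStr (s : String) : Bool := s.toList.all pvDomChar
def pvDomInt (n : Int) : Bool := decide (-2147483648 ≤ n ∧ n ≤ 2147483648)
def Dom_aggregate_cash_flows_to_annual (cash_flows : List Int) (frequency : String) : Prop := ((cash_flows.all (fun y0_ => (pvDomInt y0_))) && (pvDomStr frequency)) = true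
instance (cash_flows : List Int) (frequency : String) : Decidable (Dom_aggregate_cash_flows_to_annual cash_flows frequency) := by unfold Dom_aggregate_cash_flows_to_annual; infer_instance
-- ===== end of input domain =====

-- B replaces A's chunked slice-and-sum with a single-pass running accumulator flushed every k values (alternative decomposition, same cost).


-- ===== PORT A =====
def aggregate_cash_flows_to_annual (cash_flows : List Int) (frequency : String) : List Int :=
  let freq_map : PySem.Dict String Int :=
    PySem.Dict.ofList [("Monthly", 12), ("Quarterly", 4), ("Semi-Annually", 2), ("Annually", 1)]
  let periods_per_year := freq_map.getD frequency 1
  if periods_per_year == 1 then cash_flows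
  else
    (PySem.List.pyRange 0 (cash_flows.length : Int) periods_per_year).foldl
      (fun acc i =>
        acc ++ [(PySem.List.slice cash_flows (some i) (some (i + periods_per_year))).sum]) []

-- ===== PORT B =====
def aggregate_cash_flows_to_annual_alt (cash_flows : List Int) (frequency : String) : List Int :=
  let freq_map : PySem.Dict String Int :=
    PySem.Dict.ofList [("Monthly", 12), ("Quarterly", 4), ("Semi-Annually", 2), ("Annually", 1)]
  let periods_per_year := freq_map.getD frequency 1
  if periods_per_year == 1 then cash_flows
  else
    -- state (result, acc, cnt): running chunk sum acc, count cnt, flushed when cnt hits periods_per_year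
    let st := cash_flows.foldl
      (fun (st : List Int × Int × Int) v =>
        let acc := st.2.1 + v
        let cnt := st.2.2 + 1
        if cnt == periods_per_year then (st.1 ++ [acc], 0, 0) else (st.1, acc, cnt))
      ([], 0, 0)
    -- 'if cnt:' — flush a trailing partial chunk
    if st.2.2 ≠ 0 then st.1 ++ [st.2.1] else st.1

-- ===== PRECONDITION & SPEC =====
def Spec_aggregate_cash_flows_to_annual (cash_flows : List Int) (frequency : String) (out : List Int) : Prop := out = aggregate_cash_flows_to_annual_alt cash_flows frequency
instance (cash_flows : List Int) (frequency : String) (out : List Int) : Decidable (Spec_aggregate_cash_flows_to_annual cash_flows frequency out) := by unfold Spec_aggregate_cash_flows_to_annual; infer_instance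

-- ===== CLAIM (what is proved, stated in full; the proofs are below) =====
def Claim_equal_aggregate_cash_flows_to_annual : Prop := ∀ (cash_flows : List Int) (frequency : String), Dom_aggregate_cash_flows_to_annual cash_flows frequency → Spec_aggregate_cash_flows_to_annual cash_flows frequency (aggregate_cash_flows_to_annual cash_flows frequency)

-- ===== LEMMAS AND PROOFS =====

-- common reference form: sums of successive chunks of size p+1
def chunkSums (p : Nat) : List Int → List Int
  | [] => []
  | x :: t => (x :: t.take p).sum :: chunkSums p (t.drop p)
termination_by xs => xs.length
decreasing_by simp

theorem pyRangeP_cons (a b P : Int) (hP : 0 < P) (h : a < b) :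
    PySem.List.pyRange a b P = a :: PySem.List.pyRange (a + P) b P := by
  rw [PySem.List.pyRange_of_pos _ _ hP, PySem.List.pyRange_of_pos _ _ hP]
  have hcnt : (if a < b then ((b - a + P - 1) / P).toNat else 0)
      = (if a + P < b then ((b - (a + P) + P - 1) / P).toNat else 0) + 1 := by
    rw [if_pos h]
    by_cases h2 : a + P < b
    · rw [if_pos h2]
      have e : b - a + P - 1 = (b - (a + P) + P - 1) + 1 * P := by ring
      rw [e, Int.add_mul_ediv_right _ _ (by omega : P ≠ 0)]
      have : 0 ≤ (b - (a + P) + P - 1) / P := Int.ediv_nonneg (by omega) (by omega)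
      omega
    · rw [if_neg h2]
      have h1 : 1 * P ≤ b - a + P - 1 := by omega
      have h2' : b - a + P - 1 < (1 + 1) * P := by omega
      have : (b - a + P - 1) / P = 1 := by
        rw [← PySem.Int.floordiv_eq_ediv_of_pos hP]
        exact (PySem.Int.floordiv_eq_iff_of_pos hP).mpr ⟨h1, h2'⟩
      omega
  rw [hcnt, List.range_succ_eq_map, List.map_cons, List.map_map]
  congr 1
  · simp
  · apply List.map_congr_left
    intro k _
    simp [Function.comp]
    ring

theorem pyRange_shift (a b P : Int) (hP : 0 < P) :
    PySem.List.pyRange a b P = (PySem.List.pyRange 0 (b - a) P).map (· + a) := by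
  rw [PySem.List.pyRange_of_pos _ _ hP, PySem.List.pyRange_of_pos _ _ hP, List.map_map]
  have hc : (if (0:Int) < b - a then ((b - a - 0 + P - 1) / P).toNat else 0)
      = (if a < b then ((b - a + P - 1) / P).toNat else 0) := by
    by_cases h : a < b
    · rw [if_pos (by omega), if_pos h]; norm_num
    · rw [if_neg (by omega), if_neg h]
  rw [hc]
  apply List.map_congr_left
  intro k _
  simp [Function.comp]
  ring

theorem A_eq_chunks (p : Nat) (xs : List Int) :
    (PySem.List.pyRange 0 (xs.length : Int) ((p : Int) + 1)).foldl
      (fun acc i => acc ++ [(PySem.List.slice xs (some i) (some (i + ((p : Int) + 1)))).sum]) []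
    = chunkSums p xs := by
  rw [PySem.List.foldl_append_singleton_eq_map, List.nil_append]
  have hP : (0:Int) < (p : Int) + 1 := by omega
  induction xs using chunkSums.induct p with
  | case1 => simp [PySem.List.pyRange_of_pos _ _ hP, chunkSums]
  | case2 x t ih =>
    have hlen : (0:Int) < (((x :: t).length : Int)) := by simp
    rw [pyRangeP_cons 0 _ _ hP hlen, List.map_cons]
    rw [chunkSums]
    congr 1
    · rw [PySem.List.slice_toNat (x :: t) (le_refl (0:Int)) (show (0:Int) ≤ 0 + ((p:Int)+1) by omega)]
      rw [show ((0:Int) + ((p:Int)+1)).toNat = p + 1 by omega]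
      simp
    · rw [zero_add, pyRange_shift ((p:Int)+1) _ _ hP, List.map_map]
      have hr : PySem.List.pyRange 0 ((((x :: t).length : Int)) - ((p:Int)+1)) ((p:Int)+1)
          = PySem.List.pyRange 0 (((t.drop p).length : Int)) ((p:Int)+1) := by
        by_cases hpt : p ≤ t.length
        · congr 1; simp; omega
        · rw [PySem.List.pyRange_of_pos _ _ hP, PySem.List.pyRange_of_pos _ _ hP,
            if_neg (by simp; omega), if_neg (by simp; omega)]
      rw [hr, ← ih]
      apply List.map_congr_left
      intro i hi
      have hi0 : 0 ≤ i := ((PySem.List.mem_pyRange_iff_of_pos hP i).mp hi).1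
      simp only [Function.comp]
      rw [PySem.List.slice_toNat _ (by omega) (by omega),
          PySem.List.slice_toNat _ (by omega) (by omega)]
      have h1 : (i + ((p:Int)+1)).toNat = i.toNat + (p+1) := by omega
      have h2 : (i + ((p:Int)+1) + ((p:Int)+1)).toNat = i.toNat + (p+1) + (p+1) := by omega
      rw [h1, h2]
      have hdrop : List.drop (i.toNat + (p+1)) (x :: t) = List.drop i.toNat (t.drop p) := by
        rw [List.drop_drop]
        have : i.toNat + (p + 1) = (p+1) + i.toNat := by omega
        rw [this, show (p:Nat) + 1 + i.toNat = (p + i.toNat) + 1 by omega, List.drop_succ_cons]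
      rw [← hdrop]
      simp

-- folding a partial chunk (never reaching the flush count) just accumulates
theorem fill (p : Nat) : ∀ (c : List Int) (res : List Int) (acc cnt : Int),
    0 ≤ cnt → cnt + (c.length : Int) < (p:Int)+1 →
    c.foldl
      (fun (st : List Int × Int × Int) v =>
        let acc := st.2.1 + v
        let cnt := st.2.2 + 1
        if cnt == (p:Int)+1 then (st.1 ++ [acc], 0, 0) else (st.1, acc, cnt))
      (res, acc, cnt)
    = (res, acc + c.sum, cnt + c.length) := by
  intro c
  induction c with
  | nil => intro res acc cnt _ _; simp
  | cons v c' ih =>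
    intro res acc cnt h0 hlt
    rw [List.foldl_cons]
    have hne : ¬((cnt + 1 == (p:Int)+1) = true) := by
      simp at hlt ⊢; omega
    simp only [if_neg hne]
    rw [ih res (acc + v) (cnt + 1) (by omega) (by simp at hlt ⊢; omega)]
    simp; constructor
    · ring
    · omega

-- folding a chunk whose last element hits the flush count appends its sum and resets
theorem fullchunk (p : Nat) : ∀ (c : List Int) (res : List Int) (acc cnt : Int),
    0 ≤ cnt → cnt + (c.length : Int) = (p:Int)+1 → c ≠ [] →
    c.foldl
      (fun (st : List Int × Int × Int) v =>
        let acc := st.2.1 + v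
        let cnt := st.2.2 + 1
        if cnt == (p:Int)+1 then (st.1 ++ [acc], 0, 0) else (st.1, acc, cnt))
      (res, acc, cnt)
    = (res ++ [acc + c.sum], 0, 0) := by
  intro c
  induction c with
  | nil => intro _ _ _ _ _ h; exact absurd rfl h
  | cons v c' ih =>
    intro res acc cnt h0 heq _
    rw [List.foldl_cons]
    cases c' with
    | nil =>
      have : (cnt + 1 == (p:Int)+1) = true := by simp at heq ⊢; omega
      simp only [if_pos this]
      simp
    | cons w c'' =>
      have hne : ¬((cnt + 1 == (p:Int)+1) = true) := by
        simp at heq ⊢; omega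
      simp only [if_neg hne]
      rw [ih res (acc + v) (cnt + 1) (by omega) (by simp at heq ⊢; omega) (by simp)]
      simp; ring

-- main invariant: fold-then-flush from a chunk boundary produces the chunk sums
theorem B_fold_chunks (p : Nat) (xs : List Int) : ∀ (res : List Int),
    (let st := xs.foldl
      (fun (st : List Int × Int × Int) v =>
        let acc := st.2.1 + v
        let cnt := st.2.2 + 1
        if cnt == (p:Int)+1 then (st.1 ++ [acc], 0, 0) else (st.1, acc, cnt))
      (res, 0, 0)
     if st.2.2 ≠ 0 then st.1 ++ [st.2.1] else st.1)
    = res ++ chunkSums p xs := by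
  induction xs using chunkSums.induct p with
  | case1 => intro res; simp [chunkSums]
  | case2 x t ih =>
    intro res
    rw [chunkSums]
    have hsplit : x :: t = (x :: t.take p) ++ t.drop p := by
      rw [List.cons_append, List.take_append_drop]
    conv_lhs => rw [hsplit]
    rw [List.foldl_append]
    by_cases hd : p ≤ t.length
    · rw [fullchunk p (x :: t.take p) res 0 0 le_rfl
        (by simp [List.length_take, Nat.min_eq_left hd]) (by simp)]
      rw [ih (res ++ [0 + (x :: t.take p).sum])]
      simp
    · have hde : t.drop p = [] := by rw [List.drop_eq_nil_iff]; omega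
      rw [fill p (x :: t.take p) res 0 0 le_rfl
        (by simp [List.length_take]; omega)]
      rw [hde]
      simp [chunkSums]
      omega

theorem freq_cases (f : String) :
    (PySem.Dict.ofList [("Monthly", (12:Int)), ("Quarterly", 4), ("Semi-Annually", 2), ("Annually", 1)]).getD f 1 = 12 ∨
    (PySem.Dict.ofList [("Monthly", (12:Int)), ("Quarterly", 4), ("Semi-Annually", 2), ("Annually", 1)]).getD f 1 = 4 ∨
    (PySem.Dict.ofList [("Monthly", (12:Int)), ("Quarterly", 4), ("Semi-Annually", 2), ("Annually", 1)]).getD f 1 = 2 ∨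
    (PySem.Dict.ofList [("Monthly", (12:Int)), ("Quarterly", 4), ("Semi-Annually", 2), ("Annually", 1)]).getD f 1 = 1 := by
  simp [PySem.Dict.getD, PySem.Dict.ofList, PySem.Dict.update, PySem.Dict.insert, PySem.Dict.empty, PySem.Dict.get?, List.find?]
  cases h1 : ("Monthly" == f) <;> cases h2 : ("Quarterly" == f) <;> cases h3 : ("Semi-Annually" == f) <;> cases h4 : ("Annually" == f) <;> simp_all

-- ===== VERDICT (by name: the statement is the Claim_ definition above) =====
theorem aggregate_cash_flows_to_annual_spec : Claim_equal_aggregate_cash_flows_to_annual := by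
  intro xs f _
  unfold Spec_aggregate_cash_flows_to_annual
  unfold aggregate_cash_flows_to_annual aggregate_cash_flows_to_annual_alt
  simp only []
  rcases freq_cases f with h | h | h | h <;> rw [h]
  · have hA := A_eq_chunks 11 xs
    have hB := B_fold_chunks 11 xs []
    norm_num at hA hB
    norm_num [hA, hB]
  · have hA := A_eq_chunks 3 xs
    have hB := B_fold_chunks 3 xs []
    norm_num at hA hB
    norm_num [hA, hB]
  · have hA := A_eq_chunks 1 xs
    have hB := B_fold_chunks 1 xs []
    norm_num at hA hB
    norm_num [hA, hB]
  · norm_num
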